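-- pv_equiv track=rewrite | github.com/brzx/py_practice_lib | squad.py | get_clicks
-- ===== SOURCE A (Python) =====
-- def get_clicks(distance):
--     # Dictonary with approximate number of 'W' keystrokes to press for a given distance
--     keystrokes_dic = {50  : "1579",
--                       100 : "1558",
--                       150 : "1538",
--                       200 : "1517",
--                       250 : "1496",
--                       300:  "1475",
--                       350 : "1453",
--                       400 : "1431",
--                       450 : "1409",
--                       500 : "1387",
--                       550 : "1364",
--                       600 : "1341",
--                       650 : "1317",
--                       700 : "1292",
--                       750 : "1267",
--                       800 : "1240",
--                       850 : "1212",
--                       900 : "1183",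
--                       950 : "1152",
--                       1000: "1118",
--                       1050: "1081",
--                       1100: "1039",
--                       1150: "988",
--                       1200: "918",
--                       1250: "800"}
--     diff_old = 10000
--     for key, value in keystrokes_dic.items():
--         diff_new = abs(distance - key)
--         if distance < 50:
--             click = "小于有效距离 (50m - 1250m)!"
--         elif distance > 1250:
--             click = "大于有效距离 (50m - 1250m)!"
--             break
--         elif diff_new < diff_old:
--             diff_old = diff_new
--             click = value
--     return click
-- ===== SOURCE B (Python) =====
-- def get_clicks(distance):
--     # Closed-form nearest-key lookup (ties snap to the lower key) instead of scanning the dict.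
--     if distance < 50:
--         return "小于有效距离 (50m - 1250m)!"
--     if distance > 1250:
--         return "大于有效距离 (50m - 1250m)!"
--     # Keystroke counts for keys 50, 100, ..., 1250 in order.
--     values = ["1579", "1558", "1538", "1517", "1496", "1475", "1453", "1431",
--               "1409", "1387", "1364", "1341", "1317", "1292", "1267", "1240",
--               "1212", "1183", "1152", "1118", "1081", "1039", "988", "918", "800"]
--     return values[(distance + 24) // 50 - 1]
-- ===== Notes on version B (the rewrite author's own statement) =====
-- stated objective: simpler
-- what changed: Replaced the 25-entry dict scan tracking the best absolute difference with two early-return range guards plus a closed-form index ((distance+24)//50 - 1, ties snapping to the lower key) into a plain list of values.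
import Mathlib
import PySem

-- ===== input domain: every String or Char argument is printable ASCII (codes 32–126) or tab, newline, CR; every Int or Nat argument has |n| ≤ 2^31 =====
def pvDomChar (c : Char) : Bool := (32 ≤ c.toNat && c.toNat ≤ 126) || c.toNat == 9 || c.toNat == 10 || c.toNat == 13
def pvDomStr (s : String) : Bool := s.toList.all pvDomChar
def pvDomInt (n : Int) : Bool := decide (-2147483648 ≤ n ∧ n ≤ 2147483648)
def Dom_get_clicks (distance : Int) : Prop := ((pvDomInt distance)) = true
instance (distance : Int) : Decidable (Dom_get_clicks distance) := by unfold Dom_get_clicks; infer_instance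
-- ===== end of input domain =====

-- B replaces A's best-difference dict scan with two range guards and a closed-form index into the value list (simpler).
-- ===== PORT A =====
def gcDict : List (Int × String) :=
  [(50, "1579"), (100, "1558"), (150, "1538"), (200, "1517"), (250, "1496"),
   (300, "1475"), (350, "1453"), (400, "1431"), (450, "1409"), (500, "1387"),
   (550, "1364"), (600, "1341"), (650, "1317"), (700, "1292"), (750, "1267"),
   (800, "1240"), (850, "1212"), (900, "1183"), (950, "1152"), (1000, "1118"),
   (1050, "1081"), (1100, "1039"), (1150, "988"), (1200, "918"), (1250, "800")]

-- the for-loop with its `break`; `click` starts as "" (Python leaves it unassigned, but it is always set before use)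
def gcLoop (distance : Int) : List (Int × String) → Int → String → String
  | [], _, click => click
  | (key, value) :: rest, diff_old, click =>
    let diff_new := |distance - key|
    if distance < 50 then gcLoop distance rest diff_old "小于有效距离 (50m - 1250m)!"
    else if distance > 1250 then "大于有效距离 (50m - 1250m)!"
    else if diff_new < diff_old then gcLoop distance rest diff_new value
    else gcLoop distance rest diff_old click

def get_clicks (distance : Int) : String :=
  gcLoop distance gcDict 10000 ""

-- ===== PORT B =====
def gcValues : List String :=
  ["1579", "1558", "1538", "1517", "1496", "1475", "1453", "1431",
   "1409", "1387", "1364", "1341", "1317", "1292", "1267", "1240",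
   "1212", "1183", "1152", "1118", "1081", "1039", "988", "918", "800"]

def get_clicks_alt (distance : Int) : String :=
  if distance < 50 then "小于有效距离 (50m - 1250m)!"
  else if distance > 1250 then "大于有效距离 (50m - 1250m)!"
  else (gcValues.getD (PySem.Int.floordiv (distance + 24) 50 - 1).toNat "")

-- ===== PRECONDITION & SPEC =====
def Spec_get_clicks (distance : Int) (out : String) : Prop := out = get_clicks_alt distance
instance (distance : Int) (out : String) : Decidable (Spec_get_clicks distance out) := by unfold Spec_get_clicks; infer_instance

-- ===== CLAIM (what is proved, stated in full; the proofs are below) =====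
def Claim_equal_get_clicks : Prop := ∀ (distance : Int), Dom_get_clicks distance → Spec_get_clicks distance (get_clicks distance)

-- ===== LEMMAS AND PROOFS =====
theorem gc_small (d : Int) (h : d < 50) : get_clicks d = get_clicks_alt d := by
  simp [get_clicks, get_clicks_alt, gcDict, gcLoop, h]

theorem gc_big (d : Int) (h : d > 1250) : get_clicks d = get_clicks_alt d := by
  have h2 : ¬ d < 50 := by omega
  simp [get_clicks, get_clicks_alt, gcDict, gcLoop, h, h2]

set_option maxHeartbeats 4000000 in
set_option maxRecDepth 40000 in
theorem gc_mid_nat : ∀ n : Nat, n < 1201 → get_clicks (50 + n) = get_clicks_alt (50 + n) := by decide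

-- ===== VERDICT (by name: the statement is the Claim_ definition above) =====
theorem get_clicks_spec : Claim_equal_get_clicks := by
  intro d _
  unfold Spec_get_clicks
  by_cases h : d < 50
  · exact gc_small d h
  by_cases h2 : d > 1250
  · exact gc_big d h2
  have hn : d = 50 + ((d - 50).toNat : Int) := by omega
  have := gc_mid_nat (d - 50).toNat (by omega)
  rw [hn]; exact_mod_cast this
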